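-- pv_equiv track=rewrite | github.com/Jeffresh/spam-classifier | scripts/get_data.py | get_updated_file_names
-- ===== SOURCE A (Python) =====
-- import collections
--
-- def get_updated_file_names(types: list, files: dict) -> dict:
--
--     files_updated = collections.defaultdict(list)
--
--     for allowed_type in types:
--         for file in files[allowed_type]:
--             file_part = file.split('_')
--             if '2.' in file_part[-1]:
--                 files_updated[allowed_type+'_2'] = file
--             else:
--                 if len(files_updated[allowed_type]) > 0:
--                     date_prev = int(files_updated[allowed_type].split('_')[0])
--                     date_actual = int(file_part[0])
--                     if date_actual > date_prev:
--                         files_updated[allowed_type] = file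
--                 else:
--                     files_updated[allowed_type] = file
--
--     return files_updated
-- ===== SOURCE B (Python) =====
-- import collections
-- from functools import reduce
--
--
-- def get_updated_file_names(types: list, files: dict) -> dict:
--
--     # Phase 1: turn every file into a write event for its result key,
--     # grouped per key (keys in order of their first event).
--     events = collections.defaultdict(list)
--     for file_type in types:
--         for file in files[file_type]:
--             parts = file.split('_')
--             if '2.' in parts[-1]:
--                 events[file_type + '_2'].append(('set', file))
--             else:
--                 events[file_type].append(('newer', file))
--
--     # Phase 2: fold each key's event log; 'set' overwrites, 'newer' keeps
--     # the file with the larger leading date.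
--     def step(prev, event):
--         kind, file = event
--         if kind == 'set' or not prev:
--             return file
--         return file if int(file.split('_')[0]) > int(prev.split('_')[0]) else prev
--
--     files_updated = collections.defaultdict(list)
--     for key, evs in events.items():
--         files_updated[key] = reduce(step, evs, '')
--     return files_updated
-- ===== Notes on version B (the rewrite author's own statement) =====
-- stated objective: alternative
-- what changed: Instead of A's in-place compare-and-update of the result dict while scanning, B first flattens the scan into a per-key event log (a 'set' event for every '2.'-file, a 'newer' event for every dated file) and then computes each key's value independently by folding its event log with functools.reduce; Pre_ excludes only inputs where A raises (KeyError for a listed type missing from files, ValueError for unparseable date prefixes A actually compares).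
import Mathlib
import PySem

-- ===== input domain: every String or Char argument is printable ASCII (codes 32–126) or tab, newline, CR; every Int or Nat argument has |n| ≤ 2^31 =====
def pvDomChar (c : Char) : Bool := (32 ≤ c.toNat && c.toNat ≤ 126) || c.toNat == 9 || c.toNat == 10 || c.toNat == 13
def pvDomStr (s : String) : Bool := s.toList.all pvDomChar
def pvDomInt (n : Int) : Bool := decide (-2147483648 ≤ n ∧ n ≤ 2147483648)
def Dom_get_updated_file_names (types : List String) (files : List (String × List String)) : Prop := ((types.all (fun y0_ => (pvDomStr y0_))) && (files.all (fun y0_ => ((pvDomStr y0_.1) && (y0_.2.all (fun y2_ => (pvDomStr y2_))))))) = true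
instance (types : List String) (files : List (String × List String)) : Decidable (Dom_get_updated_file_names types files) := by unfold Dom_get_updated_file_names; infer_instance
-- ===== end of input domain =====

-- B replaces A's in-place compare-and-update of the result dict by a two-phase pass: build a
-- per-key event log, then fold each key's log independently (objective: alternative
-- decomposition, same asymptotic cost).

-- ===== PORT A =====
-- helpers shared by both ports (both Pythons literally contain these expressions):
-- f.split('_')
def pvParts (f : String) : List String := (PySem.Str.split? f "_").getD []
-- '2.' in f.split('_')[-1]
def pvIs2 (f : String) : Bool := PySem.Str.isIn "2." ((pvParts f).getLastD "")
-- int(f.split('_')[0]); none = ValueError (excluded by Pre_ wherever the Pythons evaluate it)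
def pvDate? (f : String) : Option Int := PySem.Int.ofStr? ((pvParts f).headD "")
def pvDate (f : String) : Int := (pvDate? f).getD 0
-- files[t] (KeyError excluded by Pre_)
def pvFilesOf (files : List (String × List String)) (t : String) : List String :=
  ((PySem.Dict.ofList files).get? t).getD []

-- body of A's inner loop; 'none' branch = defaultdict creating the [] entry (len 0) and at once
-- overwriting it, i.e. a plain insert at the same (appended) position
def pvStepA (t : String) (d : PySem.Dict String String) (f : String) : PySem.Dict String String :=
  if pvIs2 f then
    d.insert (t ++ "_2") f
  else
    match d.get? t with
    | some prev =>
      if 0 < PySem.Str.len prev then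
        if pvDate f > pvDate prev then d.insert t f else d
      else d.insert t f
    | none => d.insert t f

def get_updated_file_names (types : List String) (files : List (String × List String)) : List (String × String) :=
  (types.foldl (fun d t => (pvFilesOf files t).foldl (pvStepA t) d) PySem.Dict.empty).items

-- ===== PORT B =====
-- Source B's step(prev, event); the event tag 'set' is ported as true, 'newer' as false;
-- 'not prev' on a string is prev == ''
def pvStepB (prev : String) (ev : Bool × String) : String :=
  if ev.1 || prev == "" then ev.2
  else if pvDate ev.2 > pvDate prev then ev.2 else prev

-- events[k].append(e): the defaultdict creates the [] entry on first touch (key appended), then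
-- the appended-to list is stored back at the same position — one insert of getD ++ [e]
def pvAppendEv (g : PySem.Dict String (List (Bool × String))) (k : String) (e : Bool × String) :
    PySem.Dict String (List (Bool × String)) :=
  g.insert k (g.getD k [] ++ [e])

-- phase 1 of Source B
def pvEvents (types : List String) (files : List (String × List String)) :
    PySem.Dict String (List (Bool × String)) :=
  types.foldl (fun g t =>
    (pvFilesOf files t).foldl (fun g f =>
      if pvIs2 f then pvAppendEv g (t ++ "_2") (true, f)
      else pvAppendEv g t (false, f)) g) PySem.Dict.empty

-- phase 2 of Source B: reduce(step, evs, '') per key, written into a fresh dict in key order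
def get_updated_file_names_alt (types : List String) (files : List (String × List String)) : List (String × String) :=
  ((pvEvents types files).items.foldl
      (fun d kv => d.insert kv.1 (kv.2.foldl pvStepB "")) PySem.Dict.empty).items

-- ===== PRECONDITION & SPEC =====
def pvRestOf (files : List (String × List String)) (t : String) : List String :=
  (pvFilesOf files t).filter (fun f => !pvIs2 f)
def pvTwosOf (files : List (String × List String)) (t : String) : List String :=
  (pvFilesOf files t).filter pvIs2

-- Pre_ excludes exactly the inputs where Python A raises: a listed type missing from files
-- (KeyError), and date prefixes int() cannot parse on the non-'2.' files A actually compares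
-- (ValueError) — A compares them whenever a type contributes at least two non-'2.' files in
-- total (second clause) and, conservatively, in the exotic corner where a key also written as
-- s+'_2' by another listed type s is re-read as a plain type (third clause; on a few such
-- collision inputs A still returns and is excluded here although B returns the same value).
def Pre_get_updated_file_names (types : List String) (files : List (String × List String)) : Prop :=
  (∀ t ∈ types, (PySem.Dict.ofList files).contains t = true) ∧
  (∀ t ∈ types, 2 ≤ types.count t * (pvRestOf files t).length →
      ∀ f ∈ pvRestOf files t, (pvDate? f).isSome = true) ∧
  (∀ t ∈ types, (t ++ "_2") ∈ types → pvTwosOf files t ≠ [] → pvRestOf files (t ++ "_2") ≠ [] →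
      (pvDate? ((pvTwosOf files t).getLastD "")).isSome = true ∧
      ∀ f ∈ pvRestOf files (t ++ "_2"), (pvDate? f).isSome = true)

instance (types : List String) (files : List (String × List String)) : Decidable (Pre_get_updated_file_names types files) := by
  unfold Pre_get_updated_file_names; infer_instance

def pvWitness_get_updated_file_names : List String × (List (String × List String)) :=
  (["a"], [("a", ["190101_x", "190202_y", "model2.bin"])])

def Spec_get_updated_file_names (types : List String) (files : List (String × List String)) (out : List (String × String)) : Prop := out = get_updated_file_names_alt types files
instance (types : List String) (files : List (String × List String)) (out : List (String × String)) : Decidable (Spec_get_updated_file_names types files out) := by unfold Spec_get_updated_file_names; infer_instance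

-- ===== CLAIM (what is proved, stated in full; the proofs are below) =====
def Claim_equal_get_updated_file_names : Prop := ∀ (types : List String) (files : List (String × List String)), Dom_get_updated_file_names types files → Pre_get_updated_file_names types files → Spec_get_updated_file_names types files (get_updated_file_names types files)

-- ===== LEMMAS AND PROOFS =====

-- the event a file f of type t produces: its result key and (isSet, f)
def pvTag (t f : String) : String × (Bool × String) :=
  if pvIs2 f then (t ++ "_2", (true, f)) else (t, (false, f))

-- A's step, rephrased on an already-tagged event
def pvApplyE (prev? : Option String) (e : Bool × String) : String :=
  match prev? with
  | some p => if e.1 then e.2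
              else if 0 < PySem.Str.len p then (if pvDate e.2 > pvDate p then e.2 else p) else e.2
  | none => e.2

def pvStepE (d : PySem.Dict String String) (ev : String × (Bool × String)) : PySem.Dict String String :=
  d.insert ev.1 (pvApplyE (d.get? ev.1) ev.2)

-- B's grouping step on a tagged event
def pvGStep (g : PySem.Dict String (List (Bool × String))) (ev : String × (Bool × String)) :
    PySem.Dict String (List (Bool × String)) :=
  pvAppendEv g ev.1 ev.2

-- the flattened event stream both ports traverse
def pvStream (types : List String) (files : List (String × List String)) :
    List (String × (Bool × String)) :=
  types.flatMap (fun t => (pvFilesOf files t).map (pvTag t))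

-- B's dict as a function of the grouped event log
def pvM (g : PySem.Dict String (List (Bool × String))) : PySem.Dict String String :=
  PySem.Dict.mk (g.items.map (fun kv => (kv.1, kv.2.foldl pvStepB "")))

lemma pvLenPos (s : String) : 0 < PySem.Str.len s ↔ s ≠ "" := by
  rw [PySem.Str.len_eq, Int.natCast_pos, List.length_pos_iff, ne_eq, ne_eq,
    String.toList_eq_nil_iff]

-- map-replace at a key already holding that value is the identity (unique keys)
lemma pvMapSkip (k v : String) : ∀ (l : List (String × String)), k ∉ l.map Prod.fst →
    l.map (fun p => if (p.1 == k) = true then (k, v) else p) = l := by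
  intro l
  induction l with
  | nil => intro _; rfl
  | cons p rest ih =>
    intro h
    simp only [List.map_cons, List.mem_cons, not_or] at h
    rw [List.map_cons, if_neg (fun hb => h.1 ((beq_iff_eq.mp hb).symm)), ih h.2]

lemma pvGetMap (k v : String) : ∀ (l : List (String × String)),
    (l.map Prod.fst).Nodup → (PySem.Dict.mk l).get? k = some v →
    l.map (fun p => if (p.1 == k) = true then (k, v) else p) = l := by
  intro l
  induction l with
  | nil => intro _ h; exact absurd h (by simp [PySem.Dict.get?])
  | cons p rest ih =>
    intro hnd h
    rw [PySem.Dict.get?_mk_cons] at h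
    simp only [List.map_cons] at hnd
    by_cases hpk : (p.1 == k) = true
    · rw [if_pos hpk] at h
      have hk : p.1 = k := beq_iff_eq.mp hpk
      have hv : p.2 = v := by injection h
      have hnotin : k ∉ rest.map Prod.fst := by
        rw [List.nodup_cons] at hnd
        exact hk ▸ hnd.1
      rw [List.map_cons, if_pos hpk, pvMapSkip k v rest hnotin]
      rw [← hk, ← hv]
    · rw [if_neg hpk] at h
      rw [List.nodup_cons] at hnd
      rw [List.map_cons, if_neg hpk, ih hnd.2 h]

lemma pvInsertSame (d : PySem.Dict String String) (k v : String)
    (hnd : d.keys.Nodup) (h : d.get? k = some v) : d.insert k v = d := by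
  have hc : d.contains k = true := by rw [PySem.Dict.contains_eq_isSome_get?, h]; rfl
  apply PySem.Dict.ext
  rw [PySem.Dict.items_insert_of_contains _ _ hc]
  obtain ⟨l⟩ := d
  exact pvGetMap k v l (by simpa [PySem.Dict.keys] using hnd) h

-- A's raw step is pvStepE on the tagged event (nodup keys absorb the no-op branch)
lemma pvStepA_eq (t : String) (d : PySem.Dict String String) (f : String)
    (hnd : d.keys.Nodup) : pvStepA t d f = pvStepE d (pvTag t f) := by
  unfold pvStepA pvStepE pvTag pvApplyE
  by_cases h2 : pvIs2 f = true
  · rw [if_pos h2, if_pos h2]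
    cases d.get? (t ++ "_2") <;> rfl
  · rw [if_neg h2, if_neg h2]
    cases hg : d.get? t with
    | none => rfl
    | some p =>
      show (if 0 < PySem.Str.len p then if pvDate f > pvDate p then d.insert t f else d
          else d.insert t f)
        = d.insert t (if (false = true) then f
            else if 0 < PySem.Str.len p then (if pvDate f > pvDate p then f else p) else f)
      rw [if_neg (show ¬(false = true) from by simp)]
      by_cases hlp : 0 < PySem.Str.len p
      · rw [if_pos hlp, if_pos hlp]
        by_cases hcmp : pvDate f > pvDate p
        · rw [if_pos hcmp, if_pos hcmp]
        · rw [if_neg hcmp, if_neg hcmp, pvInsertSame d t p hnd hg]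
      · rw [if_neg hlp, if_neg hlp]

lemma pvStepE_nodup (d : PySem.Dict String String) (ev : String × (Bool × String))
    (hnd : d.keys.Nodup) : (pvStepE d ev).keys.Nodup :=
  PySem.Dict.nodup_keys_insert _ _ _ hnd

lemma pvFoldE_nodup : ∀ (evs : List (String × (Bool × String))) (d : PySem.Dict String String),
    d.keys.Nodup → (evs.foldl pvStepE d).keys.Nodup := by
  intro evs
  induction evs with
  | nil => exact fun d h => h
  | cons e es ih => exact fun d h => ih _ (pvStepE_nodup d e h)

-- flattening A's nested loops into one fold over the tagged stream
lemma pvFlatA_inner (t : String) : ∀ (fl : List String) (d : PySem.Dict String String),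
    d.keys.Nodup → fl.foldl (pvStepA t) d = (fl.map (pvTag t)).foldl pvStepE d := by
  intro fl
  induction fl with
  | nil => intro d _; rfl
  | cons f fs ih =>
    intro d hnd
    rw [List.map_cons, List.foldl_cons, List.foldl_cons, pvStepA_eq t d f hnd,
      ih _ (pvStepE_nodup d _ hnd)]

lemma pvFlatA (files : List (String × List String)) :
    ∀ (ts : List String) (d : PySem.Dict String String), d.keys.Nodup →
    ts.foldl (fun d t => (pvFilesOf files t).foldl (pvStepA t) d) d
      = (pvStream ts files).foldl pvStepE d := by
  intro ts
  induction ts with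
  | nil => intro d _; rfl
  | cons t ts ih =>
    intro d hnd
    rw [List.foldl_cons, pvStream, List.flatMap_cons, List.foldl_append,
      pvFlatA_inner t _ d hnd, ih _ (pvFoldE_nodup _ _ hnd)]
    rfl

-- flattening B's phase 1 into one fold over the same stream
lemma pvFlatB (files : List (String × List String)) :
    ∀ (ts : List String) (g : PySem.Dict String (List (Bool × String))),
    ts.foldl (fun g t =>
      (pvFilesOf files t).foldl (fun g f =>
        if pvIs2 f then pvAppendEv g (t ++ "_2") (true, f)
        else pvAppendEv g t (false, f)) g) g
      = (pvStream ts files).foldl pvGStep g := by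
  intro ts
  induction ts with
  | nil => intro g; rfl
  | cons t ts ih =>
    intro g
    rw [List.foldl_cons, pvStream, List.flatMap_cons, List.foldl_append, ← pvStream, ← ih]
    congr 1
    rw [List.foldl_map]
    have hfun : (fun (g' : PySem.Dict String (List (Bool × String))) (f : String) =>
        pvGStep g' (pvTag t f))
        = fun g' f => if pvIs2 f then pvAppendEv g' (t ++ "_2") (true, f)
            else pvAppendEv g' t (false, f) := by
      funext g' f
      unfold pvTag pvGStep
      by_cases h2 : pvIs2 f = true <;> simp [h2]
    rw [hfun]

-- lookup in pvM g is lookup in g followed by the fold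
lemma pvGetM (h : List (Bool × String) → String) :
    ∀ (l : List (String × List (Bool × String))) (k : String),
    (PySem.Dict.mk (l.map (fun kv => (kv.1, h kv.2)))).get? k
      = ((PySem.Dict.mk l).get? k).map h := by
  intro l
  induction l with
  | nil => intro k; simp [PySem.Dict.get?]
  | cons p rest ih =>
    intro k
    rw [List.map_cons, PySem.Dict.get?_mk_cons, PySem.Dict.get?_mk_cons]
    by_cases hk : (p.1 == k) = true
    · simp [hk]
    · simp only [hk]
      exact ih k

-- A's applied step on the folded value is B's fold step
lemma pvApply_stepB (p : String) (e : Bool × String) :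
    pvApplyE (some p) e = pvStepB p e := by
  obtain ⟨b, f⟩ := e
  cases b with
  | true => rfl
  | false =>
    by_cases hp : p = ""
    · subst hp
      show (if (false = true) then f
          else if 0 < PySem.Str.len "" then (if pvDate f > pvDate "" then f else "") else f)
        = if (false || "" == "") = true then f else if pvDate f > pvDate "" then f else ""
      rw [if_neg (show ¬(false = true) from by simp),
        if_neg (show ¬ 0 < PySem.Str.len "" from by decide), if_pos (by decide)]
    · have hb : (p == "") = false := beq_eq_false_iff_ne.mpr hp
      have hlp : 0 < PySem.Str.len p := (pvLenPos p).mpr hp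
      show (if (false = true) then f
          else if 0 < PySem.Str.len p then (if pvDate f > pvDate p then f else p) else f)
        = if (false || p == "") = true then f else if pvDate f > pvDate p then f else p
      rw [if_neg (show ¬(false = true) from by simp), if_pos hlp, Bool.false_or, hb,
        if_neg (show ¬(false = true) from by simp)]

-- one event: stepping A's dict = regrouping then re-deriving
lemma pvStepM (g : PySem.Dict String (List (Bool × String))) (ev : String × (Bool × String)) :
    pvStepE (pvM g) ev = pvM (pvGStep g ev) := by
  obtain ⟨k, e⟩ := ev
  have hget : (pvM g).get? k = (g.get? k).map (fun l => l.foldl pvStepB "") := by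
    obtain ⟨l⟩ := g
    exact pvGetM _ l k
  cases hg : g.get? k with
  | none =>
    have hc : g.contains k = false := by
      rw [PySem.Dict.contains_eq_isSome_get?, hg]; rfl
    have hcM : (pvM g).contains k = false := by
      rw [PySem.Dict.contains_eq_isSome_get?, hget, hg]; rfl
    have hgd : g.getD k [] = [] := by rw [PySem.Dict.getD_eq_get?_getD, hg]; rfl
    apply PySem.Dict.ext
    rw [pvStepE, PySem.Dict.items_insert_of_not_contains _ _ hcM, hget, hg]
    show (pvM g).items ++ [(k, pvApplyE none e)] = (pvM (pvGStep g (k, e))).items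
    rw [pvGStep, pvAppendEv, hgd, pvM, pvM]
    show g.items.map _ ++ _ = ((g.insert k ([] ++ [e])).items).map _
    rw [PySem.Dict.items_insert_of_not_contains _ _ hc, List.map_append]
    simp [pvApplyE, pvStepB]
  | some l =>
    have hc : g.contains k = true := by
      rw [PySem.Dict.contains_eq_isSome_get?, hg]; rfl
    have hcM : (pvM g).contains k = true := by
      rw [PySem.Dict.contains_eq_isSome_get?, hget, hg]; rfl
    have hgd : g.getD k [] = l := by rw [PySem.Dict.getD_eq_get?_getD, hg]; rfl
    have hval : pvApplyE ((pvM g).get? k) e = (l ++ [e]).foldl pvStepB "" := by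
      rw [hget, hg, List.foldl_append, List.foldl_cons, List.foldl_nil]
      exact pvApply_stepB _ e
    apply PySem.Dict.ext
    rw [pvStepE, PySem.Dict.items_insert_of_contains _ _ hcM, hval]
    show ((pvM g).items).map _ = (pvM (pvGStep g (k, e))).items
    rw [pvGStep, pvAppendEv, hgd, pvM, pvM]
    show (g.items.map _).map _ = ((g.insert k (l ++ [e])).items).map _
    rw [PySem.Dict.items_insert_of_contains _ _ hc, List.map_map, List.map_map]
    refine List.map_congr_left (fun p _ => ?_)
    by_cases hp : (p.1 == k) = true
    · simp [Function.comp, hp]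
    · simp [Function.comp, hp]

-- the whole stream: A's fold = pvM of B's grouping fold
lemma pvMain : ∀ (evs : List (String × (Bool × String)))
    (g : PySem.Dict String (List (Bool × String))),
    evs.foldl pvStepE (pvM g) = pvM (evs.foldl pvGStep g) := by
  intro evs
  induction evs with
  | nil => intro g; rfl
  | cons e es ih =>
    intro g
    rw [List.foldl_cons, List.foldl_cons, pvStepM, ih]

lemma pvGFold_nodup : ∀ (evs : List (String × (Bool × String)))
    (g : PySem.Dict String (List (Bool × String))),
    g.keys.Nodup → (evs.foldl pvGStep g).keys.Nodup := by
  intro evs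
  induction evs with
  | nil => exact fun g h => h
  | cons e es ih =>
    exact fun g h => ih _ (PySem.Dict.nodup_keys_insert _ _ _ h)

-- ===== VERDICT (by name: the statement is the Claim_ definition above) =====
theorem get_updated_file_names_spec : Claim_equal_get_updated_file_names := by
  intro types files _hdom _hpre
  unfold Spec_get_updated_file_names get_updated_file_names get_updated_file_names_alt
  rw [pvFlatA files types PySem.Dict.empty PySem.Dict.nodup_keys_empty]
  rw [show (pvStream types files).foldl pvStepE PySem.Dict.empty
        = pvM ((pvStream types files).foldl pvGStep PySem.Dict.empty)
      from pvMain (pvStream types files) PySem.Dict.empty]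
  rw [pvEvents, pvFlatB files types PySem.Dict.empty]
  have hnd : ((pvStream types files).foldl pvGStep PySem.Dict.empty).keys.Nodup :=
    pvGFold_nodup _ _ PySem.Dict.nodup_keys_empty
  set G := (pvStream types files).foldl pvGStep PySem.Dict.empty with hG
  rw [show (G.items.foldl (fun d kv => d.insert kv.1 (kv.2.foldl pvStepB ""))
        PySem.Dict.empty).items
      = PySem.Dict.empty.items ++ G.items.map (fun kv => (kv.1, kv.2.foldl pvStepB ""))
    from PySem.Dict.items_foldl_insert_fresh G.items Prod.fst
      (fun kv => kv.2.foldl pvStepB "") PySem.Dict.empty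
      (fun a _ => PySem.Dict.contains_empty a.1) hnd]
  rfl
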